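-- pv_equiv track=rewrite | github.com/Robin1em/DTI_Processing_Snakemake | code/Snakefiles & helper functions/helper_functions.py | get_similar_vectors
-- ===== SOURCE A (Python) =====
-- def get_similar_vectors(numbers):
--     zero_triplets = []
--     similar_triplets_lists = []
--     current_similar_triplets = []
--
--     for i in range(len(numbers[0])):
--         triplet = [numbers[j][i] for j in range(3)]
--
--         # Check if all numbers in triplet are 0
--         if all(num == 0 for num in triplet):
--             zero_triplets.append(i)
--         else:
--             # If the current triplet is not all zeros, check if it's similar to the previous one
--             if i > 0 and triplet == [numbers[j][i-1] for j in range(3)]: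
--                 # If similar, append to the current list
--                 current_similar_triplets.append(i)
--             else:
--                 # If not similar, append the current list to similar_triplets_lists and start a new list
--                 if current_similar_triplets:
--                     similar_triplets_lists.append(current_similar_triplets)
--                 current_similar_triplets = [i] # Start a new list with the current index
--
--     # Append the last list of indices if it's not empty
--     if current_similar_triplets:
--         similar_triplets_lists.append(current_similar_triplets)
--
--     return zero_triplets, similar_triplets_lists
-- ===== SOURCE B (Python) =====
-- def get_similar_vectors(numbers):
--     n = len(numbers[0])
--     triplets = [[numbers[j][i] for j in range(3)] for i in range(n)]
--     zero_triplets = []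
--     similar_triplets_lists = []
--     i = 0
--     while i < n:
--         j = i + 1
--         while j < n and triplets[j] == triplets[i]:
--             j += 1
--         idxs = list(range(i, j))
--         if all(num == 0 for num in triplets[i]):
--             zero_triplets.extend(idxs)
--         else:
--             similar_triplets_lists.append(idxs)
--         i = j
--     return zero_triplets, similar_triplets_lists
-- ===== Notes on version B (the rewrite author's own statement) =====
-- stated objective: alternative
-- what changed: B first materializes all column triplets, then walks maximal runs of consecutive equal triplets with an explicit run-scanning loop (group-by-runs decomposition), classifying each whole run as zero or similar at once, instead of A's single index loop threading an accumulator that compares each column to its predecessor and flushes on change.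
import Mathlib
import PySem

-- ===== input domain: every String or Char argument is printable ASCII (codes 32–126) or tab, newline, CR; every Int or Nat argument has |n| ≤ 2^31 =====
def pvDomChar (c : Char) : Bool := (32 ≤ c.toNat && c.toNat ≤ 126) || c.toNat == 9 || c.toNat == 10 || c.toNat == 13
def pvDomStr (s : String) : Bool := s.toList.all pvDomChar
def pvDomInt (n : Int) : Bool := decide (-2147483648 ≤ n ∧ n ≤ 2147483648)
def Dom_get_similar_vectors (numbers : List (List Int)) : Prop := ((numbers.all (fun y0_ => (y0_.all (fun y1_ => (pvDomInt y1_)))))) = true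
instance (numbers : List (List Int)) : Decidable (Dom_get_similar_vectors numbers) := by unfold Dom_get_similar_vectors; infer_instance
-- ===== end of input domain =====

-- B regroups the same work: materialize the column triplets, then scan maximal runs of
-- consecutive equal triplets and classify each run whole, instead of A's per-index
-- accumulator with flush-on-change. Same O(n) cost; objective: alternative decomposition.

-- shared helper: the column triplet [numbers[j][i] for j in range(3)]
-- (getD 0 / getD [] are only reached outside Pre_, where Python raises IndexError)
def colTrip (numbers : List (List Int)) (i : Int) : List Int :=
  (PySem.List.pyRange 0 3 1).map
    (fun j => (PySem.List.pyGet? ((PySem.List.pyGet? numbers j).getD []) i).getD 0)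

-- ===== PORT A =====
-- one step of A's `for i in range(len(numbers[0]))` loop; state = (zero_triplets, similar_triplets_lists, current_similar_triplets)
def aStep (numbers : List (List Int))
    (st : List Int × List (List Int) × List Int) (i : Nat) :
    List Int × List (List Int) × List Int :=
  let triplet := colTrip numbers (i : Int)
  if triplet.all (· == 0) then
    (st.1 ++ [(i : Int)], st.2.1, st.2.2)
  else if 0 < i ∧ triplet = colTrip numbers ((i : Int) - 1) then
    (st.1, st.2.1, st.2.2 ++ [(i : Int)])
  else
    (st.1, (if st.2.2 ≠ [] then st.2.1 ++ [st.2.2] else st.2.1), [(i : Int)])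

def get_similar_vectors (numbers : List (List Int)) : List Int × List (List Int) :=
  let n := ((PySem.List.pyGet? numbers 0).getD []).length
  let st := (List.range n).foldl (aStep numbers) ([], [], [])
  (st.1, st.2.1 ++ (if st.2.2 ≠ [] then [st.2.2] else []))

-- ===== PORT B =====
-- B's outer while loop: peel one maximal run of consecutive equal triplets per step
-- (pairs = (index, triplet)), classify it whole, recurse on the remainder.
def runsB (acc : List Int × List (List Int)) :
    List (Int × List Int) → List Int × List (List Int)
  | [] => acc
  | (i, t) :: rest =>
    let runIdx := i :: (rest.takeWhile (fun p => p.2 == t)).map Prod.fst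
    let rest' := rest.dropWhile (fun p => p.2 == t)
    if t.all (· == 0) then
      runsB (acc.1 ++ runIdx, acc.2) rest'
    else
      runsB (acc.1, acc.2 ++ [runIdx]) rest'
termination_by l => l.length
decreasing_by
  all_goals
    simp only [List.length_cons]
    exact Nat.lt_succ_of_le (List.length_dropWhile_le _ _)

def get_similar_vectors_alt (numbers : List (List Int)) : List Int × List (List Int) :=
  let n := ((PySem.List.pyGet? numbers 0).getD []).length
  let triplets := (List.range n).map (fun i : Nat => colTrip numbers (i : Int))
  runsB ([], []) (List.zip ((List.range n).map (fun i : Nat => (i : Int))) triplets)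

-- ===== PRECONDITION & SPEC =====
-- Pre_ excludes exactly the inputs on which Python A raises IndexError: an empty list,
-- or (when there is at least one column) fewer than 3 rows, or row 1 / row 2 shorter than row 0.
def Pre_get_similar_vectors (numbers : List (List Int)) : Prop :=
  numbers ≠ [] ∧
    (0 < (numbers.headD []).length →
      3 ≤ numbers.length ∧
      (numbers.headD []).length ≤ (numbers.getD 1 []).length ∧
      (numbers.headD []).length ≤ (numbers.getD 2 []).length)
instance (numbers : List (List Int)) : Decidable (Pre_get_similar_vectors numbers) := by
  unfold Pre_get_similar_vectors; infer_instance

def pvWitness_get_similar_vectors : List (List Int) := [[1, 1, 0], [2, 2, 0], [3, 3, 0]]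

def Spec_get_similar_vectors (numbers : List (List Int)) (out : List Int × List (List Int)) : Prop := out = get_similar_vectors_alt numbers
instance (numbers : List (List Int)) (out : List Int × List (List Int)) : Decidable (Spec_get_similar_vectors numbers out) := by unfold Spec_get_similar_vectors; infer_instance

-- ===== CLAIM (what is proved, stated in full; the proofs are below) =====
def Claim_equal_get_similar_vectors : Prop := ∀ (numbers : List (List Int)), Dom_get_similar_vectors numbers → Pre_get_similar_vectors numbers → Spec_get_similar_vectors numbers (get_similar_vectors numbers)

-- ===== LEMMAS AND PROOFS =====

-- A's loop re-expressed over (index, triplet) pairs, with `prev` the previous column's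
-- triplet (none at the first column); proof-only helper.
def aLoop (prev : Option (List Int)) (st : List Int × List (List Int) × List Int) :
    List (Int × List Int) → List Int × List (List Int) × List Int
  | [] => st
  | (i, t) :: rest =>
    if t.all (· == 0) then aLoop (some t) (st.1 ++ [i], st.2.1, st.2.2) rest
    else if prev = some t then aLoop (some t) (st.1, st.2.1, st.2.2 ++ [i]) rest
    else aLoop (some t) (st.1, (if st.2.2 ≠ [] then st.2.1 ++ [st.2.2] else st.2.1), [i]) rest

def finishA (st : List Int × List (List Int) × List Int) : List Int × List (List Int) :=
  (st.1, st.2.1 ++ (if st.2.2 ≠ [] then [st.2.2] else []))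

def prevAt (numbers : List (List Int)) (k : Nat) : Option (List Int) :=
  if k = 0 then none else some (colTrip numbers ((k : Int) - 1))

lemma prev_cond (numbers : List (List Int)) (k : Nat) :
    (prevAt numbers k = some (colTrip numbers (k : Int))) ↔
      (0 < k ∧ colTrip numbers (k : Int) = colTrip numbers ((k : Int) - 1)) := by
  unfold prevAt
  by_cases hk : k = 0
  · subst hk; simp
  · simp [hk, Nat.pos_of_ne_zero hk, eq_comm]

-- one loop step of A agrees with one step of aLoop
lemma step_eq (numbers : List (List Int)) (k : Nat)
    (st : List Int × List (List Int) × List Int) (l : List (Int × List Int)) :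
    aLoop (prevAt numbers k) st (((k : Int), colTrip numbers (k : Int)) :: l) =
      aLoop (some (colTrip numbers (k : Int))) (aStep numbers st k) l := by
  show (if (colTrip numbers (k : Int)).all (· == 0) then _ else _) = _
  unfold aStep
  by_cases hz : ((colTrip numbers (k : Int)).all (· == 0)) = true
  · rw [if_pos hz, if_pos hz]
  · rw [if_neg hz, if_neg hz]
    by_cases hc : prevAt numbers k = some (colTrip numbers (k : Int))
    · rw [if_pos hc, if_pos ((prev_cond numbers k).mp hc)]
    · rw [if_neg hc, if_neg (fun h => hc ((prev_cond numbers k).mpr h))]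

-- Bridge: A's foldl over range' equals aLoop over the enumerated triplet list.
lemma bridge (numbers : List (List Int)) :
    ∀ (m k : Nat) (st : List Int × List (List Int) × List Int),
      (List.range' k m).foldl (aStep numbers) st =
        aLoop (prevAt numbers k) st
          ((List.range' k m).map (fun i : Nat => ((i : Int), colTrip numbers (i : Int)))) := by
  intro m
  induction m with
  | zero => intro k st; simp [aLoop]
  | succ m ih =>
    intro k st
    rw [List.range'_succ, List.foldl_cons, List.map_cons, step_eq numbers k st, ih (k + 1)]
    have h1 : prevAt numbers (k + 1) = some (colTrip numbers (k : Int)) := by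
      simp only [prevAt, Nat.succ_ne_zero, if_false]
      norm_num
    rw [h1]

-- runsB with a general accumulator just appends to the empty-accumulator result.
lemma runsB_acc :
    ∀ (n : Nat) (l : List (Int × List Int)), l.length ≤ n →
      ∀ (a : List Int × List (List Int)),
        runsB a l = (a.1 ++ (runsB ([], []) l).1, a.2 ++ (runsB ([], []) l).2) := by
  intro n
  induction n with
  | zero =>
    intro l hl a
    rw [Nat.le_zero, List.length_eq_zero_iff] at hl
    subst hl; simp [runsB]
  | succ n ih =>
    intro l hl a
    cases l with
    | nil => simp [runsB]
    | cons p rest =>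
      obtain ⟨i, t⟩ := p
      have hrec : (rest.dropWhile (fun p => p.2 == t)).length ≤ n := by
        have h1 := List.length_dropWhile_le (fun p : Int × List Int => p.2 == t) rest
        simp only [List.length_cons] at hl
        omega
      simp only [runsB]
      by_cases hz : (List.all t (fun x => x == 0)) = true
      · rw [if_pos hz, if_pos hz,
          ih _ hrec (a.1 ++ (i :: (rest.takeWhile (fun p => p.2 == t)).map Prod.fst), a.2),
          ih _ hrec (([] : List Int) ++ (i :: (rest.takeWhile (fun p => p.2 == t)).map Prod.fst), ([] : List (List Int)))]
        simp
      · rw [if_neg hz, if_neg hz,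
          ih _ hrec (a.1, a.2 ++ [i :: (rest.takeWhile (fun p => p.2 == t)).map Prod.fst]),
          ih _ hrec (([] : List Int), ([] : List (List Int)) ++ [i :: (rest.takeWhile (fun p => p.2 == t)).map Prod.fst])]
        simp

-- Processing a run of columns all equal to an all-zero t: each index goes to zeros.
lemma aLoop_zero_run (t : List Int) (hz : (List.all t (fun x => x == 0)) = true) :
    ∀ (l : List (Int × List Int)), (∀ p ∈ l, p.2 = t) →
      ∀ (rest : List (Int × List Int)) (st : List Int × List (List Int) × List Int),
        aLoop (some t) st (l ++ rest) =
          aLoop (some t) (st.1 ++ l.map Prod.fst, st.2.1, st.2.2) rest := by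
  intro l
  induction l with
  | nil => intro _ rest st; simp
  | cons p l ih =>
    intro hall rest st
    obtain ⟨i, t'⟩ := p
    have ht' : t' = t := hall (i, t') List.mem_cons_self
    subst ht'
    rw [List.cons_append]
    simp only [aLoop]
    rw [if_pos hz, ih (fun q hq => hall q (List.mem_cons_of_mem _ hq))]
    simp

-- Processing a run of columns all equal to a non-zero t with prev = t: each index extends cur.
lemma aLoop_nz_run (t : List Int) (hz : ¬ ((List.all t (fun x => x == 0)) = true)) :
    ∀ (l : List (Int × List Int)), (∀ p ∈ l, p.2 = t) →
      ∀ (rest : List (Int × List Int)) (st : List Int × List (List Int) × List Int),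
        aLoop (some t) st (l ++ rest) =
          aLoop (some t) (st.1, st.2.1, st.2.2 ++ l.map Prod.fst) rest := by
  intro l
  induction l with
  | nil => intro _ rest st; simp
  | cons p l ih =>
    intro hall rest st
    obtain ⟨i, t'⟩ := p
    have ht' : t' = t := hall (i, t') List.mem_cons_self
    subst ht'
    rw [List.cons_append]
    simp only [aLoop]
    rw [if_neg hz, if_pos trivial, ih (fun q hq => hall q (List.mem_cons_of_mem _ hq))]
    simp

-- the head of dropWhile (·.2 == t) has a key ≠ t
lemma head_dropWhile_key_ne (t : List Int) (rest : List (Int × List Int))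
    (i' : Int) (t' : List Int)
    (hh : (rest.dropWhile (fun p => p.2 == t)).head? = some (i', t')) : t' ≠ t := by
  intro heq
  have hne : rest.dropWhile (fun p => p.2 == t) ≠ [] := by
    intro h0; rw [h0] at hh; simp at hh
  have hnot := List.head_dropWhile_not (fun p : Int × List Int => p.2 == t) hne
  rw [List.head?_eq_some_head hne] at hh
  have hh' : (rest.dropWhile (fun p => p.2 == t)).head hne = (i', t') := by
    injection hh
  rw [hh'] at hnot
  simp [heq] at hnot

-- MAIN: A's loop (via aLoop) computes B's run-grouping, provided prev differs from the
-- head key (true initially and after every dropWhile).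
lemma main_loop :
    ∀ (n : Nat) (l : List (Int × List Int)), l.length ≤ n →
      ∀ (prev : Option (List Int)) (z : List Int) (ls : List (List Int)) (c : List Int),
      (∀ i t, l.head? = some (i, t) → prev ≠ some t) →
      finishA (aLoop prev (z, ls, c) l) =
        (z ++ (runsB ([], []) l).1,
         (ls ++ (if c ≠ [] then [c] else [])) ++ (runsB ([], []) l).2) := by
  intro n
  induction n with
  | zero =>
    intro l hl prev z ls c _
    rw [Nat.le_zero, List.length_eq_zero_iff] at hl
    subst hl; simp [aLoop, runsB, finishA]
  | succ n ih =>
    intro l hl prev z ls c hprev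
    cases l with
    | nil => simp [aLoop, runsB, finishA]
    | cons p rest =>
      obtain ⟨i, t⟩ := p
      have htk : ∀ q ∈ rest.takeWhile (fun p => p.2 == t), q.2 = t := by
        intro q hq
        simpa using List.mem_takeWhile_imp hq
      have hrec : (rest.dropWhile (fun p => p.2 == t)).length ≤ n := by
        have h1 := List.length_dropWhile_le (fun p : Int × List Int => p.2 == t) rest
        simp only [List.length_cons] at hl
        omega
      have hnext : ∀ i' t', (rest.dropWhile (fun p => p.2 == t)).head? = some (i', t') →
          (some t : Option (List Int)) ≠ some t' := by
        intro i' t' hh heq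
        exact head_dropWhile_key_ne t rest i' t' hh (by injection heq with h; exact h.symm)
      have hsplit : (i, t) :: rest =
          (i, t) :: (rest.takeWhile (fun p => p.2 == t) ++ rest.dropWhile (fun p => p.2 == t)) := by
        rw [List.takeWhile_append_dropWhile]
      by_cases hz : (List.all t (fun x => x == 0)) = true
      · -- zero run
        have hr : runsB (([], []) : List Int × List (List Int)) ((i, t) :: rest) =
            runsB ([] ++ (i :: (rest.takeWhile (fun p => p.2 == t)).map Prod.fst), [])
              (rest.dropWhile (fun p => p.2 == t)) := by
          simp only [runsB]
          rw [if_pos hz]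
        conv_lhs => rw [hsplit]
        simp only [aLoop]
        rw [if_pos hz, aLoop_zero_run t hz _ htk, ih _ hrec _ _ _ _ hnext, hr,
          runsB_acc _ _ le_rfl (([] : List Int) ++ (i :: (rest.takeWhile (fun p => p.2 == t)).map Prod.fst), ([] : List (List Int)))]
        simp
      · -- non-zero run
        have hp : prev ≠ some t := hprev i t rfl
        have hr : runsB (([], []) : List Int × List (List Int)) ((i, t) :: rest) =
            runsB ([], [] ++ [i :: (rest.takeWhile (fun p => p.2 == t)).map Prod.fst])
              (rest.dropWhile (fun p => p.2 == t)) := by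
          simp only [runsB]
          rw [if_neg hz]
        conv_lhs => rw [hsplit]
        simp only [aLoop]
        rw [if_neg hz, if_neg hp, aLoop_nz_run t hz _ htk, ih _ hrec _ _ _ _ hnext, hr,
          runsB_acc _ _ le_rfl (([] : List Int), ([] : List (List Int)) ++ [i :: (rest.takeWhile (fun p => p.2 == t)).map Prod.fst])]
        by_cases hc : c = [] <;> simp [hc]

-- ===== VERDICT (by name: the statement is the Claim_ definition above) =====
theorem get_similar_vectors_spec : Claim_equal_get_similar_vectors := by
  intro numbers _ _
  unfold Spec_get_similar_vectors
  simp only [get_similar_vectors, get_similar_vectors_alt]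
  rw [List.zip_map']
  rw [List.range_eq_range', bridge numbers _ 0 ([], [], [])]
  have hmain := main_loop _ ((List.range' 0 (((PySem.List.pyGet? numbers 0).getD []).length)).map
      (fun i : Nat => ((i : Int), colTrip numbers (i : Int)))) le_rfl (prevAt numbers 0) [] [] []
      (by intro i t _ h; simp [prevAt] at h)
  simp only [finishA] at hmain
  rw [hmain]
  simp
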